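-- pv_equiv track=rewrite | github.com/martinhova01/advent-of-code | 24/12/main.py | find_sides
-- ===== SOURCE A (Python) =====
-- def find_sides(regions, visited, label):
--     sides = {}
--     directions = {"UP": (0, -1), "DOWN": (0, 1), "LEFT": (-1, 0), "RIGHT": (1, 0)}
--     for dir, (dx, dy) in directions.items():
--         sides[dir] = set()
--         for (x, y) in visited:
--             if (x + dx, y + dy) not in regions:
--                 sides[dir].add((x, y))
--             elif regions[(x + dx, y + dy)] != label:
--                 sides[dir].add((x, y))
--
--     num_sides = 0
--     for side, points in sides.items():
--         num_sides += len(points)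
--
--         # consecutive points only count as one side
--         for x, y in points:
--             if side in ("UP", "DOWN"):
--                 if (x + 1, y) in points:
--                     num_sides -= 1
--             else:
--                 if (x, y + 1) in points:
--                     num_sides -= 1
--
--     return num_sides
-- ===== SOURCE B (Python) =====
-- def find_sides(regions, visited, label):
--     # Count each straight edge segment once, at its first (topmost/leftmost) cell,
--     # in a single pass over the distinct cells -- no per-direction boundary sets.
--     cells = set(visited)
--
--     def is_side(x, y, dx, dy):
--         # cell (x,y) is in the region and its (dx,dy)-neighbour is not labelled `label`
--         return (x, y) in cells and regions.get((x + dx, y + dy)) != label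
--
--     total = 0
--     for (x, y) in cells:
--         for dx, dy in ((0, -1), (0, 1), (-1, 0), (1, 0)):
--             if is_side(x, y, dx, dy) and not is_side(x - abs(dy), y - abs(dx), dx, dy):
--                 total += 1
--     return total
-- ===== Notes on version B (the rewrite author's own statement) =====
-- stated objective: alternative
-- what changed: Instead of collecting four per-direction boundary-cell sets and then subtracting consecutive pairs, B makes a single pass over the distinct cells and counts each straight edge segment once at its first cell via a local corner-style test (side here, no side at the perpendicular predecessor).
import Mathlib
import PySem

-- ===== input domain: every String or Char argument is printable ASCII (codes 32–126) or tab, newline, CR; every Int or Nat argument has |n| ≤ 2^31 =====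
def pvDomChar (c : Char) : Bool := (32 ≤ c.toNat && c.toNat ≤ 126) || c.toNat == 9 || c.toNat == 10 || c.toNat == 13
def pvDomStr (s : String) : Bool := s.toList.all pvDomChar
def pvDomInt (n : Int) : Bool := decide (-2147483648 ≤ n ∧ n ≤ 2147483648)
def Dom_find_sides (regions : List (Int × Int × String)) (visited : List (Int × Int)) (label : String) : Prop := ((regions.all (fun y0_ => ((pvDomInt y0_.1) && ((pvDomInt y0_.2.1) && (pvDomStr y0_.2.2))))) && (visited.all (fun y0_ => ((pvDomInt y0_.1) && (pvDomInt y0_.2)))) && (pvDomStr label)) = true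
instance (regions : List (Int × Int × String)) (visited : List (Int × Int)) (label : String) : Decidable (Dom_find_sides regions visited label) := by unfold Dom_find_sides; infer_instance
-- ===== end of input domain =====

-- B counts each straight edge segment once, at its first cell, by a local corner-style
-- test in one pass — instead of A's four boundary sets plus consecutive-pair subtraction.

-- regions.get / 'in regions' / regions[k]: first-match lookup in the association list
def pvRegGet? (regions : List (Int × Int × String)) (q : Int × Int) : Option String :=
  match regions with
  | [] => none
  | (a, b, v) :: rest => if (a, b) = q then some v else pvRegGet? rest q

-- ===== PORT A =====
def find_sides (regions : List (Int × Int × String)) (visited : List (Int × Int)) (label : String) : Int :=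
  let directions : List (String × Int × Int) :=
    [("UP", (0, -1)), ("DOWN", (0, 1)), ("LEFT", (-1, 0)), ("RIGHT", (1, 0))]
  let sides : PySem.Dict String (PySem.Set (Int × Int)) :=
    directions.foldl (fun sides dir =>
      let s : PySem.Set (Int × Int) :=
        visited.foldl (fun s c =>
          match pvRegGet? regions (c.1 + dir.2.1, c.2 + dir.2.2) with
          | none => PySem.Set.add s c
          | some v => if v ≠ label then PySem.Set.add s c else s)
          PySem.Set.empty
      sides.insert dir.1 s) PySem.Dict.empty
  sides.items.foldl (fun num sp =>
    let points := sp.2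
    let num := num + PySem.Set.len points
    points.foldl (fun num c =>
      if sp.1 = "UP" ∨ sp.1 = "DOWN" then
        if PySem.Set.contains points (c.1 + 1, c.2) then num - 1 else num
      else
        if PySem.Set.contains points (c.1, c.2 + 1) then num - 1 else num) num) 0

-- ===== PORT B =====
def find_sides_alt (regions : List (Int × Int × String)) (visited : List (Int × Int)) (label : String) : Int :=
  let cells : PySem.Set (Int × Int) := PySem.Set.ofList visited
  let isSide : Int → Int → Int → Int → Bool := fun x y dx dy =>
    PySem.Set.contains cells (x, y) && (pvRegGet? regions (x + dx, y + dy) != some label)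
  cells.foldl (fun total c =>
    ([((0 : Int), (-1 : Int)), (0, 1), (-1, 0), (1, 0)] : List (Int × Int)).foldl (fun total d =>
      if isSide c.1 c.2 d.1 d.2 && !isSide (c.1 - |d.2|) (c.2 - |d.1|) d.1 d.2
      then total + 1 else total) total) 0

-- ===== PRECONDITION & SPEC =====
def Spec_find_sides (regions : List (Int × Int × String)) (visited : List (Int × Int)) (label : String) (out : Int) : Prop := out = find_sides_alt regions visited label
instance (regions : List (Int × Int × String)) (visited : List (Int × Int)) (label : String) (out : Int) : Decidable (Spec_find_sides regions visited label out) := by unfold Spec_find_sides; infer_instance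

-- ===== CLAIM (what is proved, stated in full; the proofs are below) =====
def Claim_equal_find_sides : Prop := ∀ (regions : List (Int × Int × String)) (visited : List (Int × Int)) (label : String), Dom_find_sides regions visited label → Spec_find_sides regions visited label (find_sides regions visited label)

-- ===== LEMMAS AND PROOFS =====

-- A's per-direction set-building loop builds set(filter(boundary, visited))
theorem afold_eq (regions : List (Int × Int × String)) (visited : List (Int × Int)) (label : String) (dx dy : Int) :
    visited.foldl (fun s c =>
        match pvRegGet? regions (c.1 + dx, c.2 + dy) with
        | none => PySem.Set.add s c
        | some v => if v ≠ label then PySem.Set.add s c else s) PySem.Set.empty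
      = PySem.Set.ofList (visited.filter (fun c => pvRegGet? regions (c.1 + dx, c.2 + dy) != some label)) := by
  rw [PySem.Set.ofList_eq_foldl, List.foldl_filter]
  congr 1
  funext s c
  cases h : pvRegGet? regions (c.1 + dx, c.2 + dy) with
  | none => simp
  | some v => by_cases hv : v = label <;> simp [hv, PySem.Set.add]

-- A's decrement loop subtracts a count
theorem foldl_sub_count {α : Type} (p : α → Bool) (l : List α) (a : Int) :
    l.foldl (fun acc x => if p x then acc - 1 else acc) a = a - (l.countP p : Int) := by
  induction l generalizing a with
  | nil => simp
  | cons x xs ih =>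
      rw [List.foldl_cons]
      by_cases h : p x
      · rw [if_pos h, ih, List.countP_cons_of_pos h]
        push_cast
        ring
      · rw [if_neg h, ih, List.countP_cons_of_neg h]

-- the four direction keys are fresh, so A's dict lists them in insertion order
theorem dict_items4 (s1 s2 s3 s4 : PySem.Set (Int × Int)) :
    (((((PySem.Dict.empty : PySem.Dict String (PySem.Set (Int × Int))).insert "UP" s1).insert "DOWN" s2).insert "LEFT" s3).insert "RIGHT" s4).items
      = [("UP", s1), ("DOWN", s2), ("LEFT", s3), ("RIGHT", s4)] := by
  simp [PySem.Dict.items_insert_of_not_contains, PySem.Dict.contains_insert,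
    (show (PySem.Dict.empty : PySem.Dict String (PySem.Set (Int × Int))).items = [] from rfl),
    (show (PySem.Dict.empty : PySem.Dict String (PySem.Set (Int × Int))).contains "UP" = false from rfl),
    (show (PySem.Dict.empty : PySem.Dict String (PySem.Set (Int × Int))).contains "DOWN" = false from rfl),
    (show (PySem.Dict.empty : PySem.Dict String (PySem.Set (Int × Int))).contains "LEFT" = false from rfl),
    (show (PySem.Dict.empty : PySem.Dict String (PySem.Set (Int × Int))).contains "RIGHT" = false from rfl)]

-- in a duplicate-free list, as many members have their successor present as their predecessor
theorem countP_shift (N : List (Int × Int)) (hN : N.Nodup) (e : Int × Int) :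
    N.countP (fun c => decide ((c.1 + e.1, c.2 + e.2) ∈ N))
      = N.countP (fun c => decide ((c.1 - e.1, c.2 - e.2) ∈ N)) := by
  rw [List.countP_eq_length_filter, List.countP_eq_length_filter]
  have hinj : Function.Injective (fun c : Int × Int => (c.1 + e.1, c.2 + e.2)) := by
    intro a b h
    simp only [Prod.ext_iff] at h ⊢
    omega
  have hlen : (N.filter (fun c => decide ((c.1 + e.1, c.2 + e.2) ∈ N))).length
      = ((N.filter (fun c => decide ((c.1 + e.1, c.2 + e.2) ∈ N))).map
          (fun c : Int × Int => (c.1 + e.1, c.2 + e.2))).length := by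
    simp
  rw [hlen]
  apply List.Perm.length_eq
  apply (List.perm_ext_iff_of_nodup ?_ ?_).2
  · intro x
    constructor
    · rintro hx
      simp only [List.mem_map, List.mem_filter, decide_eq_true_eq] at hx ⊢
      obtain ⟨c, ⟨hc, hcs⟩, rfl⟩ := hx
      refine ⟨hcs, ?_⟩
      have : (c.1 + e.1 - e.1, c.2 + e.2 - e.2) = c := by simp
      rw [this]; exact hc
    · intro hx
      simp only [List.mem_map, List.mem_filter, decide_eq_true_eq] at hx ⊢
      obtain ⟨hx1, hx2⟩ := hx
      refine ⟨(x.1 - e.1, x.2 - e.2), ⟨hx2, ?_⟩, ?_⟩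
      · simpa using hx1
      · simp
  · exact (hN.filter _).map hinj
  · exact hN.filter _

-- core per-direction identity: |boundary| - #consecutive-pairs = #segment-starts
theorem dir_core (visited : List (Int × Int)) (q : Int × Int → Bool) (ex ey : Int) :
    (((PySem.Set.ofList visited).filter q).length : Int)
      - (((PySem.Set.ofList visited).filter q).countP
            (fun c => decide ((c.1 + ex, c.2 + ey) ∈ (PySem.Set.ofList visited).filter q)) : Int)
      = ((PySem.Set.ofList visited).countP (fun c =>
            q c && !(decide ((c.1 - ex, c.2 - ey) ∈ PySem.Set.ofList visited)
                 && q (c.1 - ex, c.2 - ey))) : Int) := by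
  set L := PySem.Set.ofList visited with hL
  set N := L.filter q with hNdef
  have hN : N.Nodup := (PySem.Set.nodup_ofList visited).filter q
  have h1 : (L.countP (fun c => q c && !(decide ((c.1 - ex, c.2 - ey) ∈ L) && q (c.1 - ex, c.2 - ey))))
      = N.countP (fun c => !decide ((c.1 - ex, c.2 - ey) ∈ N)) := by
    rw [hNdef, List.countP_filter]
    apply List.countP_congr
    intro c _
    have : (decide ((c.1 - ex, c.2 - ey) ∈ N)) = (decide ((c.1 - ex, c.2 - ey) ∈ L)
        && q (c.1 - ex, c.2 - ey)) := by
      rw [hNdef]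
      simp [List.mem_filter, Bool.decide_and]
    rw [this]
    cases hqc : q c <;> simp
  rw [h1]
  have h2 : N.countP (fun c => !decide ((c.1 - ex, c.2 - ey) ∈ N))
      = N.length - N.countP (fun c => decide ((c.1 - ex, c.2 - ey) ∈ N)) := by
    have h := List.length_eq_countP_add_countP (fun c : Int × Int => decide ((c.1 - ex, c.2 - ey) ∈ N)) (l := N)
    have heq : (fun a : Int × Int => decide ¬((fun c : Int × Int => decide ((c.1 - ex, c.2 - ey) ∈ N)) a = true))
        = fun c : Int × Int => !decide ((c.1 - ex, c.2 - ey) ∈ N) := by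
      funext c; simp
    rw [heq] at h
    omega
  rw [h2, ← countP_shift N hN (ex, ey)]
  have h3 : N.countP (fun c => decide ((c.1 + ex, c.2 + ey) ∈ N)) ≤ N.length := List.countP_le_length
  push_cast [Nat.cast_sub h3]
  ring

-- UP/DOWN instance of dir_core, in the syntactic shapes the two ports produce
theorem side_v (visited : List (Int × Int)) (q : Int × Int → Bool) :
    ((PySem.Set.ofList (visited.filter q)).length : Int)
      - ((PySem.Set.ofList (visited.filter q)).countP
           (fun c => decide ((c.1 + 1, c.2) ∈ PySem.Set.ofList (visited.filter q))) : Int)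
    = ((PySem.Set.ofList visited).countP (fun c =>
         decide ((c.1, c.2) ∈ PySem.Set.ofList visited) && q (c.1, c.2)
           && !(decide ((c.1 - 1, c.2 - 0) ∈ PySem.Set.ofList visited) && q (c.1 - 1, c.2 - 0))) : Int) := by
  have hperm : (PySem.Set.ofList (visited.filter q)).Perm ((PySem.Set.ofList visited).filter q) := by
    apply (List.perm_ext_iff_of_nodup (PySem.Set.nodup_ofList _) ((PySem.Set.nodup_ofList _).filter q)).2
    intro x
    simp [PySem.Set.mem_ofList, List.mem_filter]
  have hmem : ∀ x : Int × Int, (x ∈ PySem.Set.ofList (visited.filter q)) ↔ (x ∈ (PySem.Set.ofList visited).filter q) :=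
    fun x => hperm.mem_iff
  have hlen := hperm.length_eq
  have hcnt : (PySem.Set.ofList (visited.filter q)).countP
        (fun c => decide ((c.1 + 1, c.2) ∈ PySem.Set.ofList (visited.filter q)))
      = ((PySem.Set.ofList visited).filter q).countP
        (fun c => decide ((c.1 + 1, c.2 + 0) ∈ (PySem.Set.ofList visited).filter q)) := by
    rw [hperm.countP_eq]
    apply List.countP_congr
    intro c _
    simp only [add_zero, hmem]
  rw [hlen, hcnt, dir_core visited q 1 0]
  congr 1
  apply List.countP_congr
  intro c hc
  have hcv : c ∈ visited := (PySem.Set.mem_ofList visited c).mp hc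
  simp [hcv]

-- LEFT/RIGHT instance of dir_core, in the syntactic shapes the two ports produce
theorem side_h (visited : List (Int × Int)) (q : Int × Int → Bool) :
    ((PySem.Set.ofList (visited.filter q)).length : Int)
      - ((PySem.Set.ofList (visited.filter q)).countP
           (fun c => decide ((c.1, c.2 + 1) ∈ PySem.Set.ofList (visited.filter q))) : Int)
    = ((PySem.Set.ofList visited).countP (fun c =>
         decide ((c.1, c.2) ∈ PySem.Set.ofList visited) && q (c.1, c.2)
           && !(decide ((c.1 - 0, c.2 - 1) ∈ PySem.Set.ofList visited) && q (c.1 - 0, c.2 - 1))) : Int) := by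
  have hperm : (PySem.Set.ofList (visited.filter q)).Perm ((PySem.Set.ofList visited).filter q) := by
    apply (List.perm_ext_iff_of_nodup (PySem.Set.nodup_ofList _) ((PySem.Set.nodup_ofList _).filter q)).2
    intro x
    simp [PySem.Set.mem_ofList, List.mem_filter]
  have hmem : ∀ x : Int × Int, (x ∈ PySem.Set.ofList (visited.filter q)) ↔ (x ∈ (PySem.Set.ofList visited).filter q) :=
    fun x => hperm.mem_iff
  have hlen := hperm.length_eq
  have hcnt : (PySem.Set.ofList (visited.filter q)).countP
        (fun c => decide ((c.1, c.2 + 1) ∈ PySem.Set.ofList (visited.filter q)))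
      = ((PySem.Set.ofList visited).filter q).countP
        (fun c => decide ((c.1 + 0, c.2 + 1) ∈ (PySem.Set.ofList visited).filter q)) := by
    rw [hperm.countP_eq]
    apply List.countP_congr
    intro c _
    simp only [add_zero, hmem]
  rw [hlen, hcnt, dir_core visited q 0 1]
  congr 1
  apply List.countP_congr
  intro c hc
  have hcv : c ∈ visited := (PySem.Set.mem_ofList visited c).mp hc
  simp [hcv]

-- B's nested loop counts, per inner-list element, the cells that pass the test
theorem foldl_foldl_count {α β : Type} (F : α → β → Bool) (ds : List β) (M : List α) (a : Int) :
    M.foldl (fun t c => ds.foldl (fun t d => if F c d then t + 1 else t) t) a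
      = a + (ds.map (fun d => (M.countP (fun c => F c d) : Int))).sum := by
  induction M generalizing a with
  | nil => simp
  | cons c M ih =>
      rw [List.foldl_cons, ih, PySem.List.foldl_count_if]
      have h1 : (ds.map (fun d => (List.countP (fun c => F c d) (c :: M) : Int))).sum
          = (ds.map (fun d => (List.countP (fun c => F c d) M : Int)
              + (if F c d then (1 : Int) else 0))).sum := by
        congr 1
        apply List.map_congr_left
        intro d _
        rw [List.countP_cons]
        by_cases h : F c d <;> simp [h]
      rw [h1, PySem.List.sum_map_add_int, PySem.List.sum_map_ite_one_zero (fun d => F c d) ds]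
      ring

-- ===== VERDICT (by name: the statement is the Claim_ definition above) =====
theorem find_sides_spec : Claim_equal_find_sides := by
  intro regions visited label _
  unfold Spec_find_sides
  simp only [find_sides, find_sides_alt]
  rw [foldl_foldl_count]
  simp only [List.foldl]
  rw [afold_eq, afold_eq, afold_eq, afold_eq, dict_items4]
  simp only [List.foldl]
  simp only [String.reduceEq, or_true, or_false, if_true, if_false]
  simp only [foldl_sub_count, PySem.Set.contains_eq_listContains, List.contains_eq_mem,
    (show ∀ s : PySem.Set (Int × Int), PySem.Set.len s = (s.length : Int) from fun _ => rfl),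
    List.map_cons, List.map_nil, List.sum_cons, List.sum_nil,
    (show |(-1 : Int)| = 1 by norm_num), (show |(0 : Int)| = 0 by norm_num),
    (show |(1 : Int)| = 1 by norm_num)]
  have h1 := side_v visited (fun c => pvRegGet? regions (c.1 + 0, c.2 + -1) != some label)
  have h2 := side_v visited (fun c => pvRegGet? regions (c.1 + 0, c.2 + 1) != some label)
  have h3 := side_h visited (fun c => pvRegGet? regions (c.1 + -1, c.2 + 0) != some label)
  have h4 := side_h visited (fun c => pvRegGet? regions (c.1 + 1, c.2 + 0) != some label)
  simp only [] at h1 h2 h3 h4 ⊢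
  omega
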